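-- pv_equiv track=rewrite | github.com/alxBlues/py_chess_ia_minimax | ajedrez.py | evaluar_tablero
-- ===== SOURCE A (Python) =====
-- valores_piezas = {
--     "p": 10,  # Peón
--     "n": 30,  # Caballo
--     "b": 30,  # Alfil
--     "r": 50,  # Torre
--     "q": 90,  # Reina
--     "k": 900,  # Rey
-- }
--
-- def evaluar_tablero(tablero):
--     """
--     Evalúa el tablero basado en la diferencia de valores de piezas, movilidad y control del centro.
--     """
--     puntaje_blancas = 0
--     puntaje_negras = 0
--     centro = [(3, 3), (3, 4), (4, 3), (4, 4)]  # Coordenadas del centro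
--
--     for fila_idx, fila in enumerate(tablero):
--         for col_idx, pieza in enumerate(fila):
--             if pieza != ".":
--                 valor = valores_piezas[pieza.lower()]
--                 if (fila_idx, col_idx) in centro:
--                     valor += 5  # Bonus por control del centro
--                 if pieza.isupper():
--                     puntaje_blancas += valor
--                 else:
--                     puntaje_negras += valor
--
--     return puntaje_negras - puntaje_blancas  # La IA maximiza negras
-- ===== SOURCE B (Python) =====
-- valores_piezas = {
--     "p": 10,
--     "n": 30,
--     "b": 30,
--     "r": 50,
--     "q": 90,
--     "k": 900,
-- }
--
-- def evaluar_tablero(tablero):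
--     # One signed accumulator: material pass over all cells, then a separate
--     # pass over the four fixed center squares (guarded against short boards).
--     score = 0
--     for fila in tablero:
--         for pieza in fila:
--             if pieza != ".":
--                 v = valores_piezas[pieza.lower()]
--                 score += -v if pieza.isupper() else v
--     for r, c in ((3, 3), (3, 4), (4, 3), (4, 4)):
--         if r < len(tablero) and c < len(tablero[r]):
--             pieza = tablero[r][c]
--             if pieza != ".":
--                 score += -5 if pieza.isupper() else 5
--     return score
-- ===== Notes on version B (the rewrite author's own statement) =====
-- stated objective: simpler
-- what changed: Replaces the enumerate-indexed double loop with centro membership tests and two separate score counters by a single signed accumulator: one index-free material pass over all cells plus a separate guarded pass over the four fixed center squares.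
import Mathlib
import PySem

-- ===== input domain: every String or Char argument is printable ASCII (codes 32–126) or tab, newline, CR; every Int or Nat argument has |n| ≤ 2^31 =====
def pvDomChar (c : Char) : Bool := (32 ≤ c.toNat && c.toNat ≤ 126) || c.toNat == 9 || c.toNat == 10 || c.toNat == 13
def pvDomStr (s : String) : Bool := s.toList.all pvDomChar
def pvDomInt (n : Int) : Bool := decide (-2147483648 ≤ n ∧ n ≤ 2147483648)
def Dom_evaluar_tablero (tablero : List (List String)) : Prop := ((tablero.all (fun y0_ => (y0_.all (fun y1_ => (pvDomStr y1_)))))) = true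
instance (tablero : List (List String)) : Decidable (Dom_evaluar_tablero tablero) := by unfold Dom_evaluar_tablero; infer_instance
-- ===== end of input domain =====

-- B replaces A's indexed double loop with two counters by one signed accumulator:
-- an index-free material pass plus a separate guarded pass over the four center squares (objective: simpler).

-- the module constant valores_piezas
def pvVals : PySem.Dict String Int :=
  PySem.Dict.ofList [("p", 10), ("n", 30), ("b", 30), ("r", 50), ("q", 90), ("k", 900)]

-- hand port of Python str.isupper (exact on ASCII: some cased char, and no lowercase char)
def pvIsupper (s : String) : Bool :=
  s.toList.any PySem.Chars.isalpha && s.toList.all (fun c => ! PySem.Chars.islower c)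

-- ===== PORT A =====
def evaluar_tablero (tablero : List (List String)) : Int :=
  let centro : List (Int × Int) := [(3, 3), (3, 4), (4, 3), (4, 4)]
  let st :=
    (PySem.List.enumerate tablero).foldl (fun (st : Int × Int) fr =>
      (PySem.List.enumerate fr.2).foldl (fun st pc =>
        if pc.2 ≠ "." then
          -- dict lookup; Pre_ guarantees the key is present (KeyError excluded)
          let valor := (PySem.Dict.get? pvVals (PySem.Str.lower pc.2)).getD 0
          let valor := if centro.contains (fr.1, pc.1) then valor + 5 else valor
          if pvIsupper pc.2 then (st.1 + valor, st.2) else (st.1, st.2 + valor)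
        else st) st) ((0 : Int), (0 : Int))
  st.2 - st.1

-- ===== PORT B =====
def evaluar_tablero_alt (tablero : List (List String)) : Int :=
  let material := tablero.foldl (fun acc fila =>
    fila.foldl (fun acc pieza =>
      if pieza ≠ "." then
        acc + (if pvIsupper pieza then
                 -((PySem.Dict.get? pvVals (PySem.Str.lower pieza)).getD 0)
               else (PySem.Dict.get? pvVals (PySem.Str.lower pieza)).getD 0)
      else acc) acc) 0
  -- 'r < len(tablero) and c < len(tablero[r])' then tablero[r][c], r c literal Nats: exactly getElem?
  let center := ([((3 : Nat), (3 : Nat)), (3, 4), (4, 3), (4, 4)]).foldl (fun acc rc =>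
    match tablero[rc.1]? with
    | some fila =>
        match fila[rc.2]? with
        | some pieza => if pieza ≠ "." then acc + (if pvIsupper pieza then -5 else 5) else acc
        | none => acc
    | none => acc) 0
  material + center

-- ===== PRECONDITION & SPEC =====
-- Pre_ excludes exactly the boards with a non-"." cell whose lowercased value is not a key of
-- valores_piezas: there Python A (and B) raises KeyError.
def Pre_evaluar_tablero (tablero : List (List String)) : Prop :=
  (tablero.all (fun fila => fila.all (fun p =>
    p == "." || (["p", "n", "b", "r", "q", "k"] : List String).contains (PySem.Str.lower p)))) = true
instance (tablero : List (List String)) : Decidable (Pre_evaluar_tablero tablero) := by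
  unfold Pre_evaluar_tablero; infer_instance

def pvWitness_evaluar_tablero : List (List String) :=
  [["r", ".", "K"], [".", "p"], [], [".", ".", ".", "Q", "n"]]

def Spec_evaluar_tablero (tablero : List (List String)) (out : Int) : Prop := out = evaluar_tablero_alt tablero
instance (tablero : List (List String)) (out : Int) : Decidable (Spec_evaluar_tablero tablero out) := by unfold Spec_evaluar_tablero; infer_instance

-- ===== CLAIM (what is proved, stated in full; the proofs are below) =====
def Claim_equal_evaluar_tablero : Prop := ∀ (tablero : List (List String)), Dom_evaluar_tablero tablero → Pre_evaluar_tablero tablero → Spec_evaluar_tablero tablero (evaluar_tablero tablero)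

-- ===== LEMMAS AND PROOFS =====

-- signed material value of one cell, and its center-bonus contribution
def pvSv (p : String) : Int :=
  if p ≠ "." then
    (if pvIsupper p then -((PySem.Dict.get? pvVals (PySem.Str.lower p)).getD 0)
     else (PySem.Dict.get? pvVals (PySem.Str.lower p)).getD 0)
  else 0

def pvCb (p : String) : Int := if p ≠ "." then (if pvIsupper p then -5 else 5) else 0

def pvCentro : List (Int × Int) := [(3, 3), (3, 4), (4, 3), (4, 4)]

def pvCd (i j : Int) (p : String) : Int :=
  pvSv p + (if pvCentro.contains (i, j) then pvCb p else 0)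

def pvRowD (i start : Int) : List String → Int
  | [] => 0
  | p :: ps => pvCd i start p + pvRowD i (start + 1) ps

def pvTblD (start : Int) : List (List String) → Int
  | [] => 0
  | f :: fs => pvRowD start 0 f + pvTblD (start + 1) fs

def pvRowSV : List String → Int
  | [] => 0
  | p :: ps => pvSv p + pvRowSV ps

def pvRowCB (i start : Int) : List String → Int
  | [] => 0
  | p :: ps => (if pvCentro.contains (i, start) then pvCb p else 0) + pvRowCB i (start + 1) ps

def pvTotSV : List (List String) → Int
  | [] => 0
  | f :: fs => pvRowSV f + pvTotSV fs

def pvTblCB (start : Int) : List (List String) → Int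
  | [] => 0
  | f :: fs => pvRowCB start 0 f + pvTblCB (start + 1) fs

def pvRAt (fila : List String) (c : Nat) : Int :=
  match fila[c]? with
  | some p => pvCb p
  | none => 0

def pvCAt (tablero : List (List String)) (r c : Nat) : Int :=
  match tablero[r]? with
  | some fila => pvRAt fila c
  | none => 0

def pvStepA (i : Int) (st : Int × Int) (pc : Int × String) : Int × Int :=
  if pc.2 ≠ "." then
    let valor := (PySem.Dict.get? pvVals (PySem.Str.lower pc.2)).getD 0
    let valor := if pvCentro.contains (i, pc.1) then valor + 5 else valor
    if pvIsupper pc.2 then (st.1 + valor, st.2) else (st.1, st.2 + valor)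
  else st

theorem pvInnerA (i : Int) (fila : List String) :
    ∀ (start : Int) (st : Int × Int),
      ((PySem.List.enumerate fila start).foldl (pvStepA i) st).2
        - ((PySem.List.enumerate fila start).foldl (pvStepA i) st).1
        = st.2 - st.1 + pvRowD i start fila := by
  induction fila with
  | nil => intro start st; simp [PySem.List.enumerate_nil, pvRowD]
  | cons p ps ih =>
      intro start st
      rw [PySem.List.enumerate_cons, List.foldl_cons, ih]
      have hstep : (pvStepA i st (start, p)).2 - (pvStepA i st (start, p)).1
          = st.2 - st.1 + pvCd i start p := by
        unfold pvStepA pvCd pvSv pvCb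
        split_ifs <;> simp <;> ring
      rw [pvRowD, hstep]; ring

theorem pvOuterA (rows : List (List String)) :
    ∀ (start : Int) (st : Int × Int),
      ((PySem.List.enumerate rows start).foldl
        (fun (st : Int × Int) fr => (PySem.List.enumerate fr.2).foldl (pvStepA fr.1) st) st).2
      - ((PySem.List.enumerate rows start).foldl
        (fun (st : Int × Int) fr => (PySem.List.enumerate fr.2).foldl (pvStepA fr.1) st) st).1
      = st.2 - st.1 + pvTblD start rows := by
  induction rows with
  | nil => intro start st; simp [PySem.List.enumerate_nil, pvTblD]
  | cons f fs ih =>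
      intro start st
      rw [PySem.List.enumerate_cons, List.foldl_cons, ih, pvTblD,
        pvInnerA start f 0 st]
      ring

theorem pvAeq (t : List (List String)) : evaluar_tablero t = pvTblD 0 t := by
  have h := pvOuterA t 0 ((0 : Int), (0 : Int))
  have h2 : ((PySem.List.enumerate t 0).foldl
      (fun (st : Int × Int) fr => (PySem.List.enumerate fr.2).foldl (pvStepA fr.1) st)
      ((0 : Int), (0 : Int))).2
    - ((PySem.List.enumerate t 0).foldl
      (fun (st : Int × Int) fr => (PySem.List.enumerate fr.2).foldl (pvStepA fr.1) st)
      ((0 : Int), (0 : Int))).1 = pvTblD 0 t := by rw [h]; ring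
  exact h2

theorem pvRowB (fila : List String) :
    ∀ (acc : Int),
      fila.foldl (fun acc pieza =>
        if pieza ≠ "." then
          acc + (if pvIsupper pieza then
                   -((PySem.Dict.get? pvVals (PySem.Str.lower pieza)).getD 0)
                 else (PySem.Dict.get? pvVals (PySem.Str.lower pieza)).getD 0)
        else acc) acc = acc + pvRowSV fila := by
  induction fila with
  | nil => intro acc; simp [pvRowSV]
  | cons p ps ih =>
      intro acc
      rw [List.foldl_cons, ih, pvRowSV]
      unfold pvSv
      split_ifs <;> ring

theorem pvMatB (t : List (List String)) :
    ∀ (acc : Int),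
      t.foldl (fun acc fila =>
        fila.foldl (fun acc pieza =>
          if pieza ≠ "." then
            acc + (if pvIsupper pieza then
                     -((PySem.Dict.get? pvVals (PySem.Str.lower pieza)).getD 0)
                   else (PySem.Dict.get? pvVals (PySem.Str.lower pieza)).getD 0)
          else acc) acc) acc = acc + pvTotSV t := by
  induction t with
  | nil => intro acc; simp [pvTotSV]
  | cons f fs ih =>
      intro acc
      rw [List.foldl_cons, pvRowB f acc, ih, pvTotSV]
      ring

theorem pvCenterStep (t : List (List String)) (r c : Nat) (acc : Int) :
    (match t[r]? with
     | some fila =>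
         match fila[c]? with
         | some pieza => if pieza ≠ "." then acc + (if pvIsupper pieza then -5 else 5) else acc
         | none => acc
     | none => acc) = acc + pvCAt t r c := by
  unfold pvCAt pvRAt pvCb
  cases t[r]? with
  | none => simp
  | some fila =>
      dsimp only
      cases fila[c]? with
      | none => simp
      | some p =>
          dsimp only
          split_ifs <;> ring

theorem pvBeq (t : List (List String)) :
    evaluar_tablero_alt t
      = pvTotSV t + (pvCAt t 3 3 + pvCAt t 3 4 + pvCAt t 4 3 + pvCAt t 4 4) := by
  show (let material := _; let center := _; material + center) = _
  rw [show ∀ a b : Int, (let material := a; let center := b; material + center) = a + b from fun _ _ => rfl]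
  rw [pvMatB t 0]
  simp only [List.foldl_cons, List.foldl_nil]
  rw [pvCenterStep t 3 3 0, pvCenterStep t 3 4, pvCenterStep t 4 3, pvCenterStep t 4 4]
  ring

theorem pvRowD_split (i : Int) (fila : List String) :
    ∀ start : Int, pvRowD i start fila = pvRowSV fila + pvRowCB i start fila := by
  induction fila with
  | nil => intro start; simp [pvRowD, pvRowSV, pvRowCB]
  | cons p ps ih =>
      intro start
      rw [pvRowD, pvRowSV, pvRowCB, ih, pvCd]
      ring

theorem pvTblD_split (t : List (List String)) :
    ∀ start : Int, pvTblD start t = pvTotSV t + pvTblCB start t := by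
  induction t with
  | nil => intro start; simp [pvTblD, pvTotSV, pvTblCB]
  | cons f fs ih =>
      intro start
      rw [pvTblD, pvTotSV, pvTblCB, ih, pvRowD_split]
      ring

theorem pvContains_iff (i j : Int) :
    pvCentro.contains (i, j) = true ↔
      (i = 3 ∧ j = 3) ∨ (i = 3 ∧ j = 4) ∨ (i = 4 ∧ j = 3) ∨ (i = 4 ∧ j = 4) := by
  simp [pvCentro, Prod.ext_iff]

theorem pvRowCB_other (i : Int) (hi : i ≠ 3 ∧ i ≠ 4) (fila : List String) :
    ∀ start : Int, pvRowCB i start fila = 0 := by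
  induction fila with
  | nil => intro start; simp [pvRowCB]
  | cons p ps ih =>
      intro start
      rw [pvRowCB, ih, if_neg]
      · ring
      · intro h
        rcases (pvContains_iff i start).mp h with ⟨h1, _⟩ | ⟨h1, _⟩ | ⟨h1, _⟩ | ⟨h1, _⟩ <;> omega

theorem pvRowCB_late (i : Int) (fila : List String) :
    ∀ start : Int, 5 ≤ start → pvRowCB i start fila = 0 := by
  induction fila with
  | nil => intro start _; simp [pvRowCB]
  | cons p ps ih =>
      intro start hs
      rw [pvRowCB, ih (start + 1) (by omega), if_neg]
      · ring
      · intro h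
        rcases (pvContains_iff i start).mp h with ⟨_, h2⟩ | ⟨_, h2⟩ | ⟨_, h2⟩ | ⟨_, h2⟩ <;> omega

theorem pvRowCB_center (i : Int) (hi : i = 3 ∨ i = 4) (fila : List String) :
    pvRowCB i 0 fila = pvRAt fila 3 + pvRAt fila 4 := by
  have hc0 : ∀ p ps s, (s = 0 ∨ s = 1 ∨ s = 2) →
      pvRowCB i s (p :: ps) = pvRowCB i (s + 1) ps := by
    intro p ps s hs
    rw [pvRowCB, if_neg]
    · ring
    · intro h
      rcases (pvContains_iff i s).mp h with ⟨_, h2⟩ | ⟨_, h2⟩ | ⟨_, h2⟩ | ⟨_, h2⟩ <;> omega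
  have hcY : ∀ p ps s, (s = 3 ∨ s = 4) →
      pvRowCB i s (p :: ps) = pvCb p + pvRowCB i (s + 1) ps := by
    intro p ps s hs
    rw [pvRowCB, if_pos]
    rw [pvContains_iff]
    rcases hi with h | h <;> rcases hs with h2 | h2 <;> subst h <;> subst h2 <;> simp
  match fila with
  | [] => simp [pvRowCB, pvRAt]
  | [a] =>
      rw [hc0 a [] 0 (by omega)]
      simp [pvRowCB, pvRAt]
  | [a, b] =>
      rw [hc0 a [b] 0 (by omega), hc0 b [] (0 + 1) (by omega)]
      simp [pvRowCB, pvRAt]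
  | [a, b, c] =>
      rw [hc0 a [b, c] 0 (by omega), hc0 b [c] (0 + 1) (by omega),
        hc0 c [] (0 + 1 + 1) (by omega)]
      simp [pvRowCB, pvRAt]
  | [a, b, c, d] =>
      rw [hc0 a [b, c, d] 0 (by omega), hc0 b [c, d] (0 + 1) (by omega),
        hc0 c [d] (0 + 1 + 1) (by omega), hcY d [] (0 + 1 + 1 + 1) (by omega)]
      simp [pvRowCB, pvRAt]
  | a :: b :: c :: d :: e :: rest =>
      rw [hc0 a (b :: c :: d :: e :: rest) 0 (by omega),
        hc0 b (c :: d :: e :: rest) (0 + 1) (by omega),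
        hc0 c (d :: e :: rest) (0 + 1 + 1) (by omega),
        hcY d (e :: rest) (0 + 1 + 1 + 1) (by omega),
        hcY e rest (0 + 1 + 1 + 1 + 1) (by omega),
        pvRowCB_late i rest (0 + 1 + 1 + 1 + 1 + 1) (by omega)]
      simp [pvRAt]
      try ring

theorem pvTblCB_late (t : List (List String)) :
    ∀ start : Int, 5 ≤ start → pvTblCB start t = 0 := by
  induction t with
  | nil => intro start _; simp [pvTblCB]
  | cons f fs ih =>
      intro start hs
      rw [pvTblCB, ih (start + 1) (by omega), pvRowCB_other start ⟨by omega, by omega⟩]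
      ring

theorem pvTblCB_eq (t : List (List String)) :
    pvTblCB 0 t = pvCAt t 3 3 + pvCAt t 3 4 + pvCAt t 4 3 + pvCAt t 4 4 := by
  match t with
  | [] => simp [pvTblCB, pvCAt]
  | [r0] =>
      simp [pvTblCB, pvCAt, pvRowCB_other 0 ⟨by omega, by omega⟩]
  | [r0, r1] =>
      simp [pvTblCB, pvCAt, pvRowCB_other 0 ⟨by omega, by omega⟩,
        pvRowCB_other 1 ⟨by omega, by omega⟩]
  | [r0, r1, r2] =>
      simp [pvTblCB, pvCAt, pvRowCB_other 0 ⟨by omega, by omega⟩,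
        pvRowCB_other 1 ⟨by omega, by omega⟩, pvRowCB_other 2 ⟨by omega, by omega⟩]
  | [r0, r1, r2, r3] =>
      simp [pvTblCB, pvCAt, pvRowCB_other 0 ⟨by omega, by omega⟩,
        pvRowCB_other 1 ⟨by omega, by omega⟩, pvRowCB_other 2 ⟨by omega, by omega⟩,
        pvRowCB_center 3 (by omega) r3]
  | r0 :: r1 :: r2 :: r3 :: r4 :: rest =>
      simp [pvTblCB, pvCAt, pvRowCB_other 0 ⟨by omega, by omega⟩,
        pvRowCB_other 1 ⟨by omega, by omega⟩, pvRowCB_other 2 ⟨by omega, by omega⟩,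
        pvRowCB_center 3 (by omega) r3, pvRowCB_center 4 (by omega) r4,
        pvTblCB_late rest 5 (by omega)]
      try ring

-- ===== VERDICT (by name: the statement is the Claim_ definition above) =====
theorem evaluar_tablero_spec : Claim_equal_evaluar_tablero := by
  intro t _ _
  unfold Spec_evaluar_tablero
  rw [pvAeq, pvBeq, pvTblD_split, pvTblCB_eq]
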